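-- pv_equiv track=rewrite | github.com/aorursy/KT_dataset_py | limatss_kernelea0a5f16cc.py | atributes_to_cost
-- ===== SOURCE A (Python) =====
-- def atributes_to_cost(atributes):
--
--   cost = 0
--
--   for att in atributes:
--
--     if (att <= 8) : cost+=-2
--
--     if (att == 9) : cost+=-1
--
--     if (att == 10) : cost+=0
--
--     if (att == 11) : cost+=1
--
--     if (att == 12) : cost+=2
--
--     if (att == 13) : cost+=3
--
--     if (att == 14) : cost+=4
--
--     if (att == 15) : cost+=6
--
--     if (att == 16) : cost+=8
--
--     if (att == 17) : cost+=11
--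
--     if (att == 18) : cost+=14
--
--   return cost
-- ===== SOURCE B (Python) =====
-- def atributes_to_cost(atributes):
--     # Stage 1: histogram of attribute scores.
--     counts = {}
--     for att in atributes:
--         counts[att] = counts.get(att, 0) + 1
--     # Stage 2: weighted sum over distinct scores (9..14 follow the arithmetic rule v-10).
--     total = 0
--     for v, n in counts.items():
--         if v <= 8:
--             total += -2 * n
--         elif v <= 14:
--             total += (v - 10) * n
--         elif v == 15:
--             total += 6 * n
--         elif v == 16:
--             total += 8 * n
--         elif v == 17:
--             total += 11 * n
--         elif v == 18:
--             total += 14 * n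
--     return total
-- ===== Notes on version B (the rewrite author's own statement) =====
-- stated objective: alternative
-- what changed: Replaces A's single pass with an 11-branch if-chain per element by a two-stage aggregation: first build a histogram of scores, then take one weighted sum over the distinct scores, using the arithmetic rule cost = v - 10 for 9..14 instead of six separate equality branches.
import Mathlib
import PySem

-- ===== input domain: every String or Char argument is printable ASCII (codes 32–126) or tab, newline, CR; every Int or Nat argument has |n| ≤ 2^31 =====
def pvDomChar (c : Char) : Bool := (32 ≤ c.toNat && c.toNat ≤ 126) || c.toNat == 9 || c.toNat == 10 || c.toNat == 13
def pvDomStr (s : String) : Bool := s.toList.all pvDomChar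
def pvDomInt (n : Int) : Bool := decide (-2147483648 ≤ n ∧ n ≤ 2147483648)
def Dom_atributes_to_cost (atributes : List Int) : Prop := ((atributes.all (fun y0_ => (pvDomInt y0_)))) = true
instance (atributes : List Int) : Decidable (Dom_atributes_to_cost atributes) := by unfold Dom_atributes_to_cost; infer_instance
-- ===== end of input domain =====

-- B replaces A's per-element 11-branch chain by a two-stage aggregation: a histogram of scores,
-- then one weighted sum over the distinct scores (with the arithmetic rule v - 10 for 9..14) (objective: alternative).
-- ===== PORT A =====
def atributes_to_cost (atributes : List Int) : Int :=
  atributes.foldl (fun cost att =>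
    let cost := if att ≤ 8 then cost + (-2) else cost
    let cost := if att = 9 then cost + (-1) else cost
    let cost := if att = 10 then cost + 0 else cost
    let cost := if att = 11 then cost + 1 else cost
    let cost := if att = 12 then cost + 2 else cost
    let cost := if att = 13 then cost + 3 else cost
    let cost := if att = 14 then cost + 4 else cost
    let cost := if att = 15 then cost + 6 else cost
    let cost := if att = 16 then cost + 8 else cost
    let cost := if att = 17 then cost + 11 else cost
    let cost := if att = 18 then cost + 14 else cost
    cost) 0

-- ===== PORT B =====
def atributes_to_cost_alt (atributes : List Int) : Int :=
  -- Stage 1: histogram (counts[att] = counts.get(att, 0) + 1)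
  let counts : PySem.Dict Int Int :=
    atributes.foldl (fun d att => d.insert att (d.getD att 0 + 1)) PySem.Dict.empty
  -- Stage 2: weighted sum over the distinct scores
  counts.items.foldl (fun total p =>
    if p.1 ≤ 8 then total + (-2) * p.2
    else if p.1 ≤ 14 then total + (p.1 - 10) * p.2
    else if p.1 = 15 then total + 6 * p.2
    else if p.1 = 16 then total + 8 * p.2
    else if p.1 = 17 then total + 11 * p.2
    else if p.1 = 18 then total + 14 * p.2
    else total) 0

-- ===== PRECONDITION & SPEC =====
def Spec_atributes_to_cost (atributes : List Int) (out : Int) : Prop := out = atributes_to_cost_alt atributes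
instance (atributes : List Int) (out : Int) : Decidable (Spec_atributes_to_cost atributes out) := by unfold Spec_atributes_to_cost; infer_instance

-- ===== CLAIM (what is proved, stated in full; the proofs are below) =====
def Claim_equal_atributes_to_cost : Prop := ∀ (atributes : List Int), Dom_atributes_to_cost atributes → Spec_atributes_to_cost atributes (atributes_to_cost atributes)

-- ===== LEMMAS AND PROOFS =====

-- the common per-score weight
def pvW (v : Int) : Int :=
  if v ≤ 8 then -2
  else if v ≤ 14 then v - 10
  else if v = 15 then 6
  else if v = 16 then 8
  else if v = 17 then 11
  else if v = 18 then 14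
  else 0

theorem stepA_eq (cost att : Int) :
    (let c := if att ≤ 8 then cost + (-2) else cost
     let c := if att = 9 then c + (-1) else c
     let c := if att = 10 then c + 0 else c
     let c := if att = 11 then c + 1 else c
     let c := if att = 12 then c + 2 else c
     let c := if att = 13 then c + 3 else c
     let c := if att = 14 then c + 4 else c
     let c := if att = 15 then c + 6 else c
     let c := if att = 16 then c + 8 else c
     let c := if att = 17 then c + 11 else c
     let c := if att = 18 then c + 14 else c
     c) = cost + pvW att := by
  by_cases h8 : att ≤ 8
  · have h9 : ¬ att = 9 := by omega
    have h10 : ¬ att = 10 := by omega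
    have h11 : ¬ att = 11 := by omega
    have h12 : ¬ att = 12 := by omega
    have h13 : ¬ att = 13 := by omega
    have h14 : ¬ att = 14 := by omega
    have h15 : ¬ att = 15 := by omega
    have h16 : ¬ att = 16 := by omega
    have h17 : ¬ att = 17 := by omega
    have h18 : ¬ att = 18 := by omega
    simp [pvW, h8, h9, h10, h11, h12, h13, h14, h15, h16, h17, h18]
  · by_cases h9 : att = 9
    · subst h9; norm_num [pvW]
    by_cases h10 : att = 10
    · subst h10; norm_num [pvW]
    by_cases h11 : att = 11
    · subst h11; norm_num [pvW]
    by_cases h12 : att = 12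
    · subst h12; norm_num [pvW]
    by_cases h13 : att = 13
    · subst h13; norm_num [pvW]
    by_cases h14 : att = 14
    · subst h14; norm_num [pvW]
    by_cases h15 : att = 15
    · subst h15; norm_num [pvW]
    by_cases h16 : att = 16
    · subst h16; norm_num [pvW]
    by_cases h17 : att = 17
    · subst h17; norm_num [pvW]
    by_cases h18 : att = 18
    · subst h18; norm_num [pvW]
    have h14' : ¬ att ≤ 14 := by omega
    simp [pvW, h8, h9, h10, h11, h12, h13, h14, h15, h16, h17, h18, h14']

theorem foldlA_eq (atributes : List Int) (init : Int) :
    atributes.foldl (fun cost att =>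
      let cost := if att ≤ 8 then cost + (-2) else cost
      let cost := if att = 9 then cost + (-1) else cost
      let cost := if att = 10 then cost + 0 else cost
      let cost := if att = 11 then cost + 1 else cost
      let cost := if att = 12 then cost + 2 else cost
      let cost := if att = 13 then cost + 3 else cost
      let cost := if att = 14 then cost + 4 else cost
      let cost := if att = 15 then cost + 6 else cost
      let cost := if att = 16 then cost + 8 else cost
      let cost := if att = 17 then cost + 11 else cost
      let cost := if att = 18 then cost + 14 else cost
      cost) init
    = init + (atributes.map pvW).sum := by
  induction atributes generalizing init with
  | nil => simp
  | cons a t ih =>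
    rw [List.foldl_cons, stepA_eq, ih, List.map_cons, List.sum_cons]
    ring

theorem stepB_eq (total : Int) (p : Int × Int) :
    (if p.1 ≤ 8 then total + (-2) * p.2
     else if p.1 ≤ 14 then total + (p.1 - 10) * p.2
     else if p.1 = 15 then total + 6 * p.2
     else if p.1 = 16 then total + 8 * p.2
     else if p.1 = 17 then total + 11 * p.2
     else if p.1 = 18 then total + 14 * p.2
     else total) = total + pvW p.1 * p.2 := by
  simp only [pvW]
  split_ifs <;> ring

theorem foldlB_eq (l : List (Int × Int)) (init : Int) :
    l.foldl (fun total p =>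
      if p.1 ≤ 8 then total + (-2) * p.2
      else if p.1 ≤ 14 then total + (p.1 - 10) * p.2
      else if p.1 = 15 then total + 6 * p.2
      else if p.1 = 16 then total + 8 * p.2
      else if p.1 = 17 then total + 11 * p.2
      else if p.1 = 18 then total + 14 * p.2
      else total) init
    = init + (l.map (fun p => pvW p.1 * p.2)).sum := by
  induction l generalizing init with
  | nil => simp
  | cons a t ih =>
    rw [List.foldl_cons, stepB_eq, ih, List.map_cons, List.sum_cons]
    ring

theorem sum_ite_single (keys : List Int) (x : Int) (hnd : keys.Nodup) (hx : x ∈ keys) :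
    (keys.map (fun k => if k = x then pvW k else 0)).sum = pvW x := by
  induction keys with
  | nil => cases hx
  | cons a t ih =>
    rw [List.map_cons, List.sum_cons]
    rw [List.nodup_cons] at hnd
    by_cases hax : a = x
    · have hxt : x ∉ t := hax ▸ hnd.1
      have hz : (t.map (fun k => if k = x then pvW k else 0)).sum = 0 := by
        apply List.sum_eq_zero
        intro y hy
        rcases List.mem_map.mp hy with ⟨k, hk, rfl⟩
        have hne : k ≠ x := fun h => hxt (h ▸ hk)
        simp [hne]
      simp [hax, hz]
    · have hxt : x ∈ t := by
        rcases List.mem_cons.mp hx with h | h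
        · exact absurd h.symm hax
        · exact h
      simp [hax, ih hnd.2 hxt]

theorem sum_counts (keys xs : List Int) (hnd : keys.Nodup) (hsub : ∀ x ∈ xs, x ∈ keys) :
    (keys.map (fun k => pvW k * (xs.count k : Int))).sum = (xs.map pvW).sum := by
  induction xs with
  | nil => simp
  | cons x t ih =>
    have hsub' : ∀ y ∈ t, y ∈ keys := fun y hy => hsub y (List.mem_cons_of_mem _ hy)
    have hx : x ∈ keys := hsub x (List.mem_cons_self ..)
    have hsplit : ∀ k : Int, pvW k * (((x :: t).count k : Nat) : Int)
        = pvW k * ((t.count k : Nat) : Int) + (if k = x then pvW k else 0) := by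
      intro k
      by_cases h : k = x
      · subst h
        rw [List.count_cons]
        simp
        ring
      · have hne : x ≠ k := fun h' => h h'.symm
        rw [List.count_cons]
        simp [h, hne]
    calc (keys.map (fun k => pvW k * ((x :: t).count k : Int))).sum
        = (keys.map (fun k => pvW k * ((t.count k : Nat) : Int) + (if k = x then pvW k else 0))).sum := by
          apply congrArg
          exact List.map_congr_left (fun k _ => hsplit k)
      _ = (keys.map (fun k => pvW k * ((t.count k : Nat) : Int))).sum
            + (keys.map (fun k => if k = x then pvW k else 0)).sum := by
          rw [← List.sum_map_add]
      _ = (t.map pvW).sum + pvW x := by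
          rw [ih hsub', sum_ite_single keys x hnd hx]
      _ = ((x :: t).map pvW).sum := by
          rw [List.map_cons, List.sum_cons]; ring

-- ===== VERDICT (by name: the statement is the Claim_ definition above) =====
theorem atributes_to_cost_spec : Claim_equal_atributes_to_cost := by
  intro atributes _
  unfold Spec_atributes_to_cost atributes_to_cost atributes_to_cost_alt
  rw [PySem.Dict.foldl_insert_getD_add_one_eq_counter, foldlB_eq, foldlA_eq,
    PySem.Dict.items_counter, List.map_map]
  simp only [Function.comp_def]
  rw [sum_counts _ _ (PySem.Set.nodup_ofList atributes)
    (fun x hx => (PySem.Set.mem_ofList ..).mpr hx)]
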